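-- pv_equiv track=rewrite | github.com/yyeongeun/codingtest | programmers/문자열나누기.py | solution
-- ===== SOURCE A (Python) =====
-- def solution(s):
--     answer = 0
--     cnt1, cnt2 = 0,0
--
--     for i in s:
--         if cnt1 == cnt2:
--             answer += 1
--             k = i
--         if k == i:
--             cnt1 += 1
--         else:
--             cnt2 += 1
--
--     return answer
-- ===== SOURCE B (Python) =====
-- def solution(s):
--     # Slice-and-count formulation: the first segment of a balanced-split string
--     # ends at the smallest even length j with s[:j].count(s[0]) == j // 2
--     # (the balance changes by +-1 per char, so it can only return to 0 at even
--     # lengths); count the segment, cut it off, repeat on the remainder.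
--     answer = 0
--     while s:
--         j = 2
--         while j <= len(s) and 2 * s[:j].count(s[0]) != j:
--             j += 2
--         answer += 1
--         s = s[j:]
--     return answer
-- ===== Notes on version B (the rewrite author's own statement) =====
-- stated objective: alternative
-- what changed: Replaces A's single-pass running pair of counters (with a carried reference char) by a cut-and-recount scheme: repeatedly probe even prefix lengths j=2,4,... of the remaining string and use slice.count to find the first prefix where the reference char makes up exactly half, then slice that segment off; no running counters survive across characters.
import Mathlib
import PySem

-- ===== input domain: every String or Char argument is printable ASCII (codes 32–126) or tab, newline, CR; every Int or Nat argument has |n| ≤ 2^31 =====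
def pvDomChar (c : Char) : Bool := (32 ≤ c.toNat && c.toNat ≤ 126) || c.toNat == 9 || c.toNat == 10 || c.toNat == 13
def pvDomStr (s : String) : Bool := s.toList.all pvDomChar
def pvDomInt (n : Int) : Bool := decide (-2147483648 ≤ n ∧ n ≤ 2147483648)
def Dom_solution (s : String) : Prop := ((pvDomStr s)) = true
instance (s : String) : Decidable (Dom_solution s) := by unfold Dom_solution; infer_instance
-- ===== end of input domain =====

-- B replaces A's flat single-counter pass by a cut-and-recount scheme (probe even prefix
-- lengths with slice counting, then cut the segment off); alternative structure, not faster.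


-- ===== PORT A =====
-- state = (answer, cnt1, cnt2, k); Python's k is unassigned before the first iteration but is
-- always written before it is read (cnt1 == cnt2 initially), so the initial 'a' is never used.
def stepA (st : Int × Int × Int × Char) (i : Char) : Int × Int × Int × Char :=
  let (answer, cnt1, cnt2, k) := st
  let (answer, k) := if cnt1 == cnt2 then (answer + 1, i) else (answer, k)
  if k == i then (answer, cnt1 + 1, cnt2, k) else (answer, cnt1, cnt2 + 1, k)

def solution (s : String) : Int :=
  (s.toList.foldl stepA (0, 0, 0, 'a')).1

-- ===== PORT B =====
-- inner while of Source B: advance j by 2 while j <= len(s) and 2 * s[:j].count(s[0]) != j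
def innerB (ref : Char) (l : List Char) (j : Nat) : Nat :=
  if j ≤ l.length ∧ 2 * (l.take j).count ref ≠ j then innerB ref l (j + 2) else j
termination_by l.length + 2 - j
decreasing_by omega

theorem innerB_ge (ref : Char) (l : List Char) (j : Nat) : j ≤ innerB ref l j := by
  induction j using innerB.induct ref l with
  | case1 x h ih => rw [innerB, if_pos h]; omega
  | case2 x h => rw [innerB, if_neg h]

-- outer while of Source B: count the segment, cut it off (s = s[j:]), repeat
def outerB (l : List Char) (answer : Int) : Int :=
  match l with
  | [] => answer
  | ref :: rest => outerB ((ref :: rest).drop (innerB ref (ref :: rest) 2)) (answer + 1)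
termination_by l.length
decreasing_by
  have := innerB_ge ref (ref :: rest) 2
  simp only [List.length_drop, List.length_cons]; omega

def solution_alt (s : String) : Int := outerB s.toList 0

-- ===== PRECONDITION & SPEC =====
def Spec_solution (s : String) (out : Int) : Prop := out = solution_alt s
instance (s : String) (out : Int) : Decidable (Spec_solution s out) := by unfold Spec_solution; infer_instance

-- ===== CLAIM (what is proved, stated in full; the proofs are below) =====
def Claim_equal_solution : Prop := ∀ (s : String), Dom_solution s → Spec_solution s (solution s)

-- ===== LEMMAS AND PROOFS =====

-- Common reference semantics: segment recursion keeping only the running balance b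
-- (= cnt1 - cnt2 of A; = 2*count(prefix, ref) - len(prefix) of B).
mutual
def segOuter : List Char → Int
  | [] => 0
  | ref :: rest => 1 + segBal ref 1 rest
termination_by l => l.length
def segBal (ref : Char) (b : Int) : List Char → Int
  | [] => 0
  | c :: rest =>
    let b' := b + (if c == ref then 1 else -1)
    if b' = 0 then segOuter rest else segBal ref b' rest
termination_by l => l.length
end

-- A-side invariant: from a balanced counter state the fold counts segOuter; from an
-- unbalanced state with difference b it counts segBal.
theorem foldA_inv (l : List Char) :
    (∀ (ans c : Int) (k : Char),
      (l.foldl stepA (ans, c, c, k)).1 = ans + segOuter l) ∧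
    (∀ (ans c1 c2 b : Int) (k : Char),
      c1 - c2 = b → c1 ≠ c2 →
      (l.foldl stepA (ans, c1, c2, k)).1 = ans + segBal k b l) := by
  induction l with
  | nil => simp [segOuter, segBal]
  | cons c rest ih =>
    constructor
    · intro ans cv k
      have h1 : stepA (ans, cv, cv, k) c = (ans + 1, cv + 1, cv, c) := by
        simp [stepA]
      rw [List.foldl_cons, h1, ih.2 (ans + 1) (cv + 1) cv 1 c (by omega) (by omega)]
      simp [segOuter]; ring
    · intro ans c1 c2 b k hd hne
      have hne' : (c1 == c2) = false := by simp; omega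
      by_cases hk : k = c
      · have h1 : stepA (ans, c1, c2, k) c = (ans, c1 + 1, c2, k) := by
          simp [stepA, hne', hk]
        rw [List.foldl_cons, h1]
        have hck : (c == k) = true := by simp [hk]
        by_cases hb : c1 + 1 = c2
        · rw [show (c1 + 1 : Int) = c2 from hb, ih.1 ans c2 k]
          have : b + 1 = 0 := by omega
          simp [segBal, hck, this]
        · rw [ih.2 ans (c1 + 1) c2 (b + 1) k (by omega) hb]
          have : ¬ (b + 1 = 0) := by omega
          simp [segBal, hck, this]
      · have h1 : stepA (ans, c1, c2, k) c = (ans, c1, c2 + 1, k) := by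
          have : (k == c) = false := by simp [hk]
          simp [stepA, hne', this]
        rw [List.foldl_cons, h1]
        have hck : (c == k) = false := by simp; exact fun h => hk h.symm
        by_cases hb : c1 = c2 + 1
        · rw [show (c1 : Int) = c2 + 1 from hb, ih.1 ans (c2 + 1) k]
          have : b + -1 = 0 := by omega
          simp [segBal, hck, this]
        · rw [ih.2 ans c1 (c2 + 1) (b - 1) k (by omega) (by omega)]
          have : ¬ (b + -1 = 0) := by omega
          simp [segBal, hck, this, sub_eq_add_neg]

theorem count_take_succ (ref : Char) (l : List Char) (i : Nat) (h : i < l.length) :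
    (l.take (i + 1)).count ref = (l.take i).count ref + (if l[i] == ref then 1 else 0) := by
  simp only [List.take_add_one, List.getElem?_eq_getElem h, Option.toList_some,
    List.count_append, List.count_singleton]

-- B-side inner invariant: at even probe position j, segBal on the rest from the balance of
-- the (j-1)-prefix equals segOuter of what remains after the boundary innerB finds.
theorem innerB_inv (ref : Char) (l : List Char) (j : Nat) :
    2 ≤ j → j % 2 = 0 →
    segBal ref (2 * ((l.take (j - 1)).count ref : Int) - ((j : Int) - 1)) (l.drop (j - 1))
      = segOuter (l.drop (innerB ref l j)) := by
  induction j using innerB.induct ref l with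
  | case2 x h =>
    intro h2 hev
    rw [innerB, if_neg h]
    by_cases hxn : x ≤ l.length
    · have hcnt : 2 * (l.take x).count ref = x := by tauto
      have hx1 : x - 1 < l.length := by omega
      have hxx : x - 1 + 1 = x := by omega
      have hd1 : l.drop (x - 1) = l[x - 1] :: l.drop x := by
        have := (List.getElem_cons_drop hx1).symm
        rwa [hxx] at this
      have hc1 : (l.take x).count ref = (l.take (x - 1)).count ref + (if l[x - 1] == ref then 1 else 0) := by
        have := count_take_succ ref l (x - 1) hx1
        rwa [hxx] at this
      have hc1' : ((l.take x).count ref : Int)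
          = ((l.take (x - 1)).count ref : Int) + (if l[x - 1] == ref then 1 else 0) := by
        rw [hc1]; split_ifs <;> simp
      have hbval : (2 * ((l.take (x - 1)).count ref : Int) - ((x : Int) - 1))
          + (if l[x - 1] == ref then (1 : Int) else -1)
          = 2 * ((l.take x).count ref : Int) - (x : Int) := by
        rw [hc1']; split_ifs <;> ring
      have hbzero : 2 * ((l.take x).count ref : Int) - (x : Int) = 0 := by
        have : (2 * ((l.take x).count ref : Int)) = (x : Int) := by exact_mod_cast hcnt
        omega
      rw [hd1]
      simp only [segBal]
      rw [hbval, if_pos hbzero]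
    · have hge : l.length ≤ x - 1 := by omega
      rw [List.drop_eq_nil_of_le hge, List.drop_eq_nil_of_le (by omega : l.length ≤ x)]
      simp [segBal, segOuter]
  | case1 x h ih =>
    intro h2 hev
    rw [innerB, if_pos h]
    obtain ⟨hxn, hcnt⟩ := h
    have hx1 : x - 1 < l.length := by omega
    have hxx : x - 1 + 1 = x := by omega
    have hd1 : l.drop (x - 1) = l[x - 1] :: l.drop x := by
      have := (List.getElem_cons_drop hx1).symm
      rwa [hxx] at this
    have hc1 : (l.take x).count ref = (l.take (x - 1)).count ref + (if l[x - 1] == ref then 1 else 0) := by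
      have := count_take_succ ref l (x - 1) hx1
      rwa [hxx] at this
    have hc1' : ((l.take x).count ref : Int)
        = ((l.take (x - 1)).count ref : Int) + (if l[x - 1] == ref then 1 else 0) := by
      rw [hc1]; split_ifs <;> simp
    have hbval : (2 * ((l.take (x - 1)).count ref : Int) - ((x : Int) - 1))
        + (if l[x - 1] == ref then (1 : Int) else -1)
        = 2 * ((l.take x).count ref : Int) - (x : Int) := by
      rw [hc1']; split_ifs <;> ring
    have hbne : 2 * ((l.take x).count ref : Int) - (x : Int) ≠ 0 := by
      have hne : (2 * ((l.take x).count ref : Int)) ≠ (x : Int) := by exact_mod_cast hcnt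
      omega
    rw [hd1]
    simp only [segBal]
    rw [hbval, if_neg hbne]
    have ihx := ih (by omega) (by omega)
    have hxx2 : x + 2 - 1 = x + 1 := by omega
    rw [hxx2] at ihx
    by_cases hxl : x < l.length
    · have hd2 : l.drop x = l[x] :: l.drop (x + 1) := (List.getElem_cons_drop hxl).symm
      have hc2' : ((l.take (x + 1)).count ref : Int)
          = ((l.take x).count ref : Int) + (if l[x] == ref then 1 else 0) := by
        rw [count_take_succ ref l x hxl]; split_ifs <;> simp
      have hbval2 : (2 * ((l.take x).count ref : Int) - (x : Int))
          + (if l[x] == ref then (1 : Int) else -1)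
          = 2 * ((l.take (x + 1)).count ref : Int) - ((x : Int) + 1) := by
        rw [hc2']; split_ifs <;> ring
      have hbne2 : 2 * ((l.take (x + 1)).count ref : Int) - ((x : Int) + 1) ≠ 0 := by
        have h4 : (x : Int) % 2 = 0 := by
          have : ((x % 2 : Nat) : Int) = ((0 : Nat) : Int) := by exact_mod_cast congrArg (Nat.cast (R := Int)) hev
          omega
        omega
      rw [hd2]
      simp only [segBal]
      rw [hbval2, if_neg hbne2]
      have : ((x : Int) + 2 - 1) = (x : Int) + 1 := by ring
      simpa [this] using ihx
    · have hge : l.length ≤ x := by omega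
      rw [List.drop_eq_nil_of_le hge]
      rw [List.drop_eq_nil_of_le (by omega : l.length ≤ x + 1)] at ihx
      simpa [segBal] using ihx

-- B-side outer invariant
theorem outerB_eq (l : List Char) (ans : Int) : outerB l ans = ans + segOuter l := by
  induction l, ans using outerB.induct with
  | case1 ans => simp [outerB, segOuter]
  | case2 ans ref rest ih =>
    rw [outerB, ih]
    have h := innerB_inv ref (ref :: rest) 2 (by omega) (by omega)
    norm_num [List.count_singleton] at h
    simp only [segOuter]
    rw [← h]
    ring

-- ===== VERDICT (by name: the statement is the Claim_ definition above) =====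
theorem solution_spec : Claim_equal_solution := by
  intro s _
  unfold Spec_solution solution solution_alt
  rw [outerB_eq]
  simpa using (foldA_inv s.toList).1 0 0 'a'
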